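-- pv_equiv track=rewrite | github.com/bacillus-biofilms/biofilm-data-analysis | scripts/phyl_tree.py | __get_zero_gap_size
-- ===== SOURCE A (Python) =====
-- def __get_zero_gap_size(data):
--     in_gap = False
--     max_gap = 0
--     gap_len = 0
--     first_non_zero = False
--
--     for d in data:
--         if d == 0 and not first_non_zero:
--             continue
--         if d != 0:
--             first_non_zero = True
--
--         if d == 0:
--             if not in_gap:
--                 gap_len = 1
--                 in_gap = True
--             else:
--                 gap_len += 1
--         else:
--             if gap_len > max_gap:
--                 max_gap = gap_len
--             gap_len = 0
--             in_gap = False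
--
--     return max_gap
-- ===== SOURCE B (Python) =====
-- def __get_zero_gap_size(data):
--     # positions of the nonzero entries; internal zero runs are exactly
--     # the gaps between consecutive nonzero positions
--     nz = [i for i, d in enumerate(data) if d != 0]
--     return max((b - a - 1 for a, b in zip(nz, nz[1:])), default=0)
-- ===== Notes on version B (the rewrite author's own statement) =====
-- stated objective: simpler
-- what changed: Replaces A's flag-driven stateful scan (in_gap/first_non_zero/gap_len bookkeeping) by collecting the indices of the nonzero elements and taking the maximum gap between consecutive nonzero indices, which automatically ignores leading and trailing zeros.
import Mathlib
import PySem

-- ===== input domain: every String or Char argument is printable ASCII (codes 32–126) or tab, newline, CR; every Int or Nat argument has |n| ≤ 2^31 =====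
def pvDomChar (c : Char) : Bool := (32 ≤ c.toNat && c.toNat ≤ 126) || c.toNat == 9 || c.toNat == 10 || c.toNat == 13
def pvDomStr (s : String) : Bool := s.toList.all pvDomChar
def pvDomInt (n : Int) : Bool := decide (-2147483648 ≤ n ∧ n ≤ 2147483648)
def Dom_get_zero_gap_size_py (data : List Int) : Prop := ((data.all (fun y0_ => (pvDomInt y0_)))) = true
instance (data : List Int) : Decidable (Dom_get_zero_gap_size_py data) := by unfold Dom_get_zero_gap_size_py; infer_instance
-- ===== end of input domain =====

-- B replaces A's flag-driven stateful scan by "max gap between consecutive nonzero indices" (simpler decomposition, same cost).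

-- ===== PORT A =====
-- loop state: (in_gap, max_gap, gap_len, first_non_zero)
def pvStep (st : Bool × Int × Int × Bool) (d : Int) : Bool × Int × Int × Bool :=
  if d == 0 && !st.2.2.2 then st                    -- continue
  else
    let fnz := if d ≠ 0 then true else st.2.2.2     -- first_non_zero = True
    if d == 0 then
      if !st.1 then (true, st.2.1, 1, fnz)
      else (true, st.2.1, st.2.2.1 + 1, fnz)
    else
      (false, if st.2.2.1 > st.2.1 then st.2.2.1 else st.2.1, 0, fnz)

def get_zero_gap_size_py (data : List Int) : Int :=
  (data.foldl pvStep (false, 0, 0, false)).2.1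

-- ===== PORT B =====
-- nz = [i for i, d in enumerate(data) if d != 0]
def pvNz (data : List Int) : List Int :=
  ((PySem.List.enumerate data).filter (fun p => p.2 != 0)).map (fun p => p.1)

-- return max((b - a - 1 for a, b in zip(nz, nz[1:])), default=0)
def get_zero_gap_size_py_alt (data : List Int) : Int :=
  let nz := pvNz data
  PySem.List.maxD ((nz.zip (PySem.List.slice nz (some 1) none)).map (fun p => p.2 - p.1 - 1))
    (fun x => x) 0

-- ===== PRECONDITION & SPEC =====
def Spec_get_zero_gap_size_py (data : List Int) (out : Int) : Prop := out = get_zero_gap_size_py_alt data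
instance (data : List Int) (out : Int) : Decidable (Spec_get_zero_gap_size_py data out) := by unfold Spec_get_zero_gap_size_py; infer_instance

-- ===== CLAIM (what is proved, stated in full; the proofs are below) =====
def Claim_equal_get_zero_gap_size_py : Prop := ∀ (data : List Int), Dom_get_zero_gap_size_py data → Spec_get_zero_gap_size_py data (get_zero_gap_size_py data)

-- ===== LEMMAS AND PROOFS =====

-- number of leading zeros (as an Int)
def pvLz : List Int → Int
  | [] => 0
  | d :: l => if d = 0 then pvLz l + 1 else 0

-- reference value: longest run of zeros lying strictly between two nonzero elements
def pvR : List Int → Int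
  | [] => 0
  | d :: l =>
    if d = 0 then pvR l
    else if l.any (fun x => x ≠ 0) then max (pvLz l) (pvR l) else 0

-- simplified A loop state: (max_gap, gap_len)
def pvF (st : Int × Int) (d : Int) : Int × Int :=
  if d = 0 then (st.1, st.2 + 1) else (max st.1 st.2, 0)

lemma pvLz_nonneg (l : List Int) : 0 ≤ pvLz l := by
  induction l with
  | nil => simp [pvLz]
  | cons d l ih =>
    by_cases h : d = 0
    · simp only [pvLz, if_pos h]
      omega
    · simp [pvLz, h]

lemma pvR_nonneg (l : List Int) : 0 ≤ pvR l := by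
  induction l with
  | nil => simp [pvR]
  | cons d l ih =>
    by_cases h : d = 0
    · simpa [pvR, h] using ih
    · simp only [pvR, if_neg h]
      have := pvLz_nonneg l
      split_ifs <;> omega

-- once first_non_zero is true, A's loop is the simplified (max_gap, gap_len) loop
lemma pvStep_bridge (l : List Int) : ∀ (m c : Int), 0 ≤ c →
    (l.foldl pvStep (decide (0 < c), m, c, true)).2.1 = (l.foldl pvF (m, c)).1 := by
  induction l with
  | nil => intro m c _; rfl
  | cons d l ih =>
    intro m c hc
    by_cases h : d = 0
    · subst h
      have hstep : pvStep (decide (0 < c), m, c, true) 0 = (decide (0 < c + 1), m, c + 1, true) := by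
        by_cases h0 : (0:Int) < c
        · simp [pvStep, h0, show (0:Int) < c + 1 by omega]
        · have hc0 : c = 0 := by omega
          subst hc0; simp [pvStep]
      rw [List.foldl_cons, hstep, List.foldl_cons,
          show pvF (m, c) 0 = (m, c + 1) from by simp [pvF]]
      exact ih m (c + 1) (by omega)
    · have hstep : pvStep (decide (0 < c), m, c, true) d = (decide ((0:Int) < 0), max m c, 0, true) := by
      -- the update 'if gap_len > max_gap then gap_len else max_gap' is max
        simp only [pvStep, h, beq_iff_eq, Bool.and_eq_true]
        simp [h, show (if c > m then c else m) = max m c from by omega]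
      rw [List.foldl_cons, hstep, List.foldl_cons,
          show pvF (m, c) d = (max m c, 0) from by simp [pvF, h]]
      exact ih (max m c) 0 le_rfl

-- closed form of the simplified loop
lemma pvF_core (l : List Int) : ∀ (m c : Int), 0 ≤ c →
    (l.foldl pvF (m, c)).1
      = if l.any (fun x => x ≠ 0) then max m (max (c + pvLz l) (pvR l)) else m := by
  induction l with
  | nil => intro m c _; simp
  | cons d l ih =>
    intro m c hc
    by_cases h : d = 0
    · subst h
      rw [List.foldl_cons, show pvF (m, c) 0 = (m, c + 1) from by simp [pvF],
          ih m (c + 1) (by omega),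
          show pvLz (0 :: l) = pvLz l + 1 from by simp [pvLz],
          show pvR (0 :: l) = pvR l from by simp [pvR],
          show ((0 :: l).any fun x => decide (x ≠ 0)) = (l.any fun x => decide (x ≠ 0)) from by simp]
      split_ifs <;> omega
    · rw [List.foldl_cons, show pvF (m, c) d = (max m c, 0) from by simp [pvF, h],
          ih (max m c) 0 le_rfl,
          show pvLz (d :: l) = 0 from by simp [pvLz, h],
          show pvR (d :: l)
              = (if (l.any fun x => decide (x ≠ 0)) = true then max (pvLz l) (pvR l) else 0)
            from by simp [pvR, h],
          if_pos (show ((d :: l).any fun x => decide (x ≠ 0)) = true from by simp [h])]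
      have h1 := pvLz_nonneg l
      have h2 := pvR_nonneg l
      split_ifs <;> omega

-- A computes the reference value
lemma pvA_eq (data : List Int) : get_zero_gap_size_py data = pvR data := by
  induction data with
  | nil => rfl
  | cons d l ih =>
    by_cases h : d = 0
    · subst h
      have hstep : pvStep (false, 0, 0, false) 0 = (false, 0, 0, false) := by simp [pvStep]
      simpa [get_zero_gap_size_py, pvR, hstep] using ih
    · have hstep : pvStep (false, 0, 0, false) d = (false, 0, 0, true) := by
        simp [pvStep, h]
      have hrw : get_zero_gap_size_py (d :: l)
          = (l.foldl pvStep (decide ((0:Int) < 0), 0, 0, true)).2.1 := by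
        simp [get_zero_gap_size_py, hstep]
      rw [hrw, pvStep_bridge l 0 0 le_rfl, pvF_core l 0 0 le_rfl,
          show pvR (d :: l)
              = (if (l.any fun x => decide (x ≠ 0)) = true then max (pvLz l) (pvR l) else 0)
            from by simp [pvR, h]]
      have h1 := pvLz_nonneg l
      have h2 := pvR_nonneg l
      split_ifs <;> omega

-- structure of the nonzero-index list
lemma pv_enum_shift (l : List Int) : ∀ (s t : Int),
    PySem.List.enumerate l (s + t) = (PySem.List.enumerate l s).map (fun p => (p.1 + t, p.2)) := by
  induction l with
  | nil => intro s t; simp [PySem.List.enumerate_nil]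
  | cons x xs ih =>
    intro s t
    rw [PySem.List.enumerate_cons, PySem.List.enumerate_cons, List.map_cons]
    have : s + t + 1 = (s + 1) + t := by ring
    rw [this, ih]

lemma pvNz_cons (d : Int) (l : List Int) :
    pvNz (d :: l) = if d = 0 then (pvNz l).map (· + 1)
                    else 0 :: (pvNz l).map (· + 1) := by
  have h1 : PySem.List.enumerate l 1 = (PySem.List.enumerate l 0).map (fun p => (p.1 + 1, p.2)) := by
    have := pv_enum_shift l 0 1
    simpa using this
  by_cases h : d = 0 <;>
    simp [pvNz, PySem.List.enumerate_cons, h1, h, List.filter_map, List.map_map, Function.comp_def]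

-- the gap list is invariant under shifting all indices
lemma pv_gaps_map_add (xs : List Int) :
    ((xs.map (· + 1)).zip ((xs.map (· + 1)).drop 1)).map (fun p => p.2 - p.1 - 1)
      = (xs.zip (xs.drop 1)).map (fun p => p.2 - p.1 - 1) := by
  rw [← List.map_drop, List.zip_map, List.map_map]
  apply List.map_congr_left
  intro p _
  simp [Prod.map]

lemma pvNz_nil_iff (l : List Int) :
    pvNz l = [] ↔ l.any (fun x => x ≠ 0) = false := by
  induction l with
  | nil => simp [pvNz, PySem.List.enumerate_nil]
  | cons d l ih =>
    rw [pvNz_cons]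
    by_cases h : d = 0 <;> simp [h, ih]

lemma pvNz_head (l : List Int) (h : l.any (fun x => x ≠ 0) = true) :
    (pvNz l).head? = some (pvLz l) := by
  induction l with
  | nil => simp at h
  | cons d l ih =>
    rw [pvNz_cons]
    by_cases hd : d = 0
    · subst hd
      simp only [List.any_cons] at h
      simp only [ne_eq, not_true_eq_false, decide_false, Bool.false_or] at h
      have := ih h
      simp [pvLz, List.head?_map, this]
    · simp [hd, pvLz]

lemma pv_foldl_max_comm (r : List Int) : ∀ (x y : Int),
    r.foldl max (max x y) = max x (r.foldl max y) := by
  induction r with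
  | nil => intro x y; rfl
  | cons a r ih =>
    intro x y
    rw [List.foldl_cons, List.foldl_cons, max_assoc, ih]

-- B computes the reference value
lemma pvB_eq (data : List Int) : get_zero_gap_size_py_alt data = pvR data := by
  have hslice : ∀ xs : List Int, PySem.List.slice xs (some 1) none = xs.drop 1 := by
    intro xs
    simpa using PySem.List.slice_from xs (show (0:Int) ≤ 1 by omega)
  induction data with
  | nil => rfl
  | cons d l ih =>
    rw [get_zero_gap_size_py_alt, pvNz_cons]
    by_cases h : d = 0
    · subst h
      simp only [if_true]
      rw [hslice, pv_gaps_map_add]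
      simpa [get_zero_gap_size_py_alt, hslice, pvR] using ih
    · simp only [if_neg h]
      rcases hnz : pvNz l with _ | ⟨a, t⟩
      · -- no nonzero in l: a single nonzero index, hence no gaps at all
        have hany : l.any (fun x => x ≠ 0) = false := (pvNz_nil_iff l).1 hnz
        have hR : pvR (d :: l) = 0 := by
          simp only [pvR, if_neg h, hany]
          simp
        simp [hslice, PySem.List.maxD, PySem.List.max?, hR]
      · have hany : l.any (fun x => x ≠ 0) = true := by
          cases hb : l.any fun x => decide (x ≠ 0)
          · exfalso
            have h0 := (pvNz_nil_iff l).mpr hb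
            rw [hnz] at h0
            exact List.cons_ne_nil _ _ h0
          · rfl
        have ha : a = pvLz l := by
          have := pvNz_head l hany
          rw [hnz] at this; simpa using this
        -- the gap list of 0 :: (a+1) :: map (+1) t is a :: (gap list of a :: t)
        have hz := pv_gaps_map_add (a :: t)
        rw [hslice]
        simp only [List.map_cons, List.drop_succ_cons, List.drop_zero] at hz ⊢
        rw [List.zip_cons_cons, List.map_cons, hz]
        rw [get_zero_gap_size_py_alt, hnz, hslice] at ih
        simp only [List.drop_succ_cons, List.drop_zero] at ih
        rw [show pvR (d :: l) = max (pvLz l) (pvR l) from by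
              simp only [pvR, if_neg h, hany]
              simp, ← ha]
        have hhead : (((0 : Int), a + 1).2 - ((0 : Int), a + 1).1 - 1) = a := by simp
        rw [hhead, PySem.List.maxD, PySem.List.max?_id_cons, Option.getD_some]
        rcases hg : ((a :: t).zip t).map (fun p => p.2 - p.1 - 1) with _ | ⟨g, r⟩
        · rw [hg] at ih ⊢
          rw [show PySem.List.maxD ([] : List Int) (fun x : Int => x) 0 = 0 from rfl] at ih
          have h0 := pvLz_nonneg l
          simp only [List.foldl_nil]
          omega
        · rw [hg] at ih ⊢
          rw [PySem.List.maxD, PySem.List.max?_id_cons, Option.getD_some] at ih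
          rw [List.foldl_cons, pv_foldl_max_comm, ih]

-- ===== VERDICT (by name: the statement is the Claim_ definition above) =====
theorem get_zero_gap_size_py_spec : Claim_equal_get_zero_gap_size_py := by
  intro data _
  unfold Spec_get_zero_gap_size_py
  rw [pvA_eq, pvB_eq]
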